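-- pv_equiv track=rewrite | github.com/1st-award/codetree-TILs | 240110/원소 값들의 최대 합/maximum-sum-of-element-values.py | solution
-- ===== SOURCE A (Python) =====
-- def solution(N, M, numbers):
--     best_score = 0
--     for n in range(N):
--         score = 0
--         next_idx = n
--         for _ in range(M):
--             score += numbers[next_idx]
--             next_idx = numbers[next_idx] - 1
--         best_score = max(best_score, score)
--     return best_score
-- ===== SOURCE B (Python) =====
-- def solution(N, M, numbers):
--     # Binary lifting: precompute 2^k-step jump targets and path sums once,
--     # then answer each start's M-step sum in O(log M).
--     L = len(numbers)
--     if N <= 0 or M <= 0 or L == 0: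
--         return 0
--     nxt = [(v - 1) % L for v in numbers]
--     wt = list(numbers)
--     levels = []
--     m = M
--     while m > 0:
--         levels.append((m % 2 == 1, nxt, wt))
--         m //= 2
--         if m > 0:
--             nxt2 = [nxt[nxt[i]] for i in range(L)]
--             wt2 = [wt[i] + wt[nxt[i]] for i in range(L)]
--             nxt, wt = nxt2, wt2
--     best = 0
--     for n in range(N):
--         s, c = 0, n
--         for bit, nx, w in levels:
--             if bit:
--                 s += w[c]
--                 c = nx[c]
--         best = max(best, s)
--     return best
-- ===== Notes on version B (the rewrite author's own statement) =====
-- stated objective: faster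
-- what changed: Replaces the per-start M-step simulation with binary lifting: 2^k jump targets and 2^k path sums are precomputed once by repeated doubling, and each start's M-step sum is assembled from the set bits of M.
-- outside the precondition, e.g. on solution(1, 2, [1, 99]): A returns 2, B returns 2
import Mathlib
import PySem

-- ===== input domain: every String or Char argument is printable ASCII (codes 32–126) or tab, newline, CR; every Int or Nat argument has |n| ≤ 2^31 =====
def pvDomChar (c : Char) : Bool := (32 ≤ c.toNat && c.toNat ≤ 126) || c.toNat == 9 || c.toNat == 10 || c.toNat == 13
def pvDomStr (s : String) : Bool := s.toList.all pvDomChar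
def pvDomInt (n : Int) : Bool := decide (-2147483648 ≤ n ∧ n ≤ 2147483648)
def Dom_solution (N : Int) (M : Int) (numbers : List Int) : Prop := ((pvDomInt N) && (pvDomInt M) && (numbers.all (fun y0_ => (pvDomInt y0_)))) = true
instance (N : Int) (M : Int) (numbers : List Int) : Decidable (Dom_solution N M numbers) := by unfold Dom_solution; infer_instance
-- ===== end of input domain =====

-- B replaces A's per-start M-step walk simulation with binary lifting (2^k jump
-- targets and 2^k-step path sums built by repeated doubling); objective: faster.

-- ===== PORT A =====
-- one step of A's inner loop: score += numbers[next_idx]; next_idx = numbers[next_idx] - 1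
def stepA (xs : List Int) (st : Int × Int) : Int × Int :=
  let v := PySem.List.pyGetD xs st.2 0
  (st.1 + v, v - 1)

def solution (N : Int) (M : Int) (numbers : List Int) : Int :=
  (PySem.List.pyRange 0 N 1).foldl
    (fun best n =>
      let r := (PySem.List.pyRange 0 M 1).foldl (fun st _ => stepA numbers st) (0, n)
      max best r.1) 0

-- ===== PORT B =====
-- body of B's query loop: 'for bit, nx, w in levels: if bit: s += w[c]; c = nx[c]'
def queryLevel (sc : Int × Int) (lvl : Bool × List Int × List Int) : Int × Int :=
  if lvl.1 then (sc.1 + PySem.List.pyGetD lvl.2.2 sc.2 0, PySem.List.pyGetD lvl.2.1 sc.2 0)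
  else sc

-- B's table-building 'while m > 0' loop: record (bit, nxt, wt) per bit of m, doubling the tables
def buildLevels (L : Nat) (nxt wt : List Int) (m : Nat) : List (Bool × List Int × List Int) :=
  if m = 0 then []
  else
    (decide (m % 2 = 1), nxt, wt) ::
      (if m / 2 = 0 then []
       else
         buildLevels L
           ((List.range L).map fun i =>
             PySem.List.pyGetD nxt (PySem.List.pyGetD nxt (Int.ofNat i) 0) 0)
           ((List.range L).map fun i =>
             PySem.List.pyGetD wt (Int.ofNat i) 0 +
             PySem.List.pyGetD wt (PySem.List.pyGetD nxt (Int.ofNat i) 0) 0)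
           (m / 2))
termination_by m
decreasing_by omega

def solution_alt (N : Int) (M : Int) (numbers : List Int) : Int :=
  if N ≤ 0 ∨ M ≤ 0 ∨ numbers.length = 0 then 0
  else
    let L := numbers.length
    let nxt := numbers.map fun v => PySem.Int.mod (v - 1) (L : Int)
    let levels := buildLevels L nxt numbers M.toNat
    (PySem.List.pyRange 0 N 1).foldl
      (fun best n => max best ((levels.foldl queryLevel (0, n)).1)) 0

-- ===== PRECONDITION & SPEC =====
-- Pre_ restricts a running walk (N > 0, M > 0) to the functional-graph domain: every value
-- is a valid 1-based index up to Python's negative wraparound (1-L ≤ v ≤ L) and N ≤ L.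
-- This is narrower than where A returns: A also happens to return when an out-of-range
-- value sits at a node no walk ever visits (e.g. (1, 2, [1, 99])); Pre_ conservatively
-- excludes those, since reachability is not a closed-form condition.
def Pre_solution (N : Int) (M : Int) (numbers : List Int) : Prop :=
  0 < N → (N ≤ (numbers.length : Int) ∧
    (0 < M → ∀ v ∈ numbers,
      1 - (numbers.length : Int) ≤ v ∧ v ≤ (numbers.length : Int)))
instance (N : Int) (M : Int) (numbers : List Int) : Decidable (Pre_solution N M numbers) := by
  unfold Pre_solution; infer_instance

def pvWitness_solution : Int × Int × List Int := (2, 3, [2, 1])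

def Spec_solution (N : Int) (M : Int) (numbers : List Int) (out : Int) : Prop := out = solution_alt N M numbers
instance (N : Int) (M : Int) (numbers : List Int) (out : Int) : Decidable (Spec_solution N M numbers out) := by unfold Spec_solution; infer_instance

-- ===== CLAIM (what is proved, stated in full; the proofs are below) =====
def Claim_equal_solution : Prop := ∀ (N : Int) (M : Int) (numbers : List Int), Dom_solution N M numbers → Pre_solution N M numbers → Spec_solution N M numbers (solution N M numbers)

-- ===== LEMMAS AND PROOFS =====

-- numbers[i] totalised with default 0 (used only under InRange)
def pv_pget (xs : List Int) (i : Int) : Int := PySem.List.pyGetD xs i 0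
-- the normalised jump function of the walk
def pv_g (xs : List Int) (i : Int) : Int := PySem.Int.mod (pv_pget xs i - 1) xs.length
-- sum of k steps of the walk from normalised index i
def pv_wsum (xs : List Int) : Nat → Int → Int
  | 0, _ => 0
  | k+1, i => pv_pget xs i + pv_wsum xs k (pv_g xs i)
-- k-fold iterate of the jump function
def pv_gpow (xs : List Int) : Nat → Int → Int
  | 0, i => i
  | k+1, i => pv_gpow xs k (pv_g xs i)

def pv_Good (xs : List Int) : Prop :=
  ∀ v ∈ xs, 1 - (xs.length : Int) ≤ v ∧ v ≤ (xs.length : Int)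

-- the tables hold p-step jumps and p-step sums on every valid index
def pv_TblOK (xs : List Int) (p : Nat) (nxt wt : List Int) : Prop :=
  nxt.length = xs.length ∧ wt.length = xs.length ∧
  ∀ i : Int, 0 ≤ i → i < (xs.length : Int) →
    PySem.List.pyGetD nxt i 0 = pv_gpow xs p i ∧ PySem.List.pyGetD wt i 0 = pv_wsum xs p i

lemma pv_mod_id {i L : Int} (h0 : 0 ≤ i) (h1 : i < L) : PySem.Int.mod i L = i := by
  rw [PySem.Int.mod_eq_emod_of_pos (by omega)]
  exact Int.emod_eq_of_lt h0 h1

lemma pv_pget_wrap (xs : List Int) {i : Int}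
    (h0 : -(xs.length : Int) ≤ i) (h1 : i < (xs.length : Int)) :
    pv_pget xs (PySem.Int.mod i (xs.length : Int)) = pv_pget xs i := by
  have hL : 0 < (xs.length : Int) := by omega
  by_cases hi : 0 ≤ i
  · rw [pv_mod_id hi h1]
  · have hm : PySem.Int.mod i (xs.length : Int) = i + xs.length := by
      rw [PySem.Int.mod_eq_emod_of_pos hL]
      have h := Int.add_mul_emod_self_left i (xs.length : Int) 1
      rw [mul_one] at h
      rw [← h, Int.emod_eq_of_lt (by omega) (by omega)]
    unfold pv_pget
    rw [hm, PySem.List.pyGetD_eq_getElem xs 0 (by omega) (by omega)]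
    have hk : i = -(((-i).toNat : Nat) : Int) := by omega
    conv_rhs => rw [hk]
    rw [PySem.List.pyGetD_neg_natCast xs (-i).toNat 0 (by omega) (by omega)]
    congr 1
    omega

lemma pv_g_bounds (xs : List Int) (hL : 0 < (xs.length : Int)) (i : Int) :
    0 ≤ pv_g xs i ∧ pv_g xs i < (xs.length : Int) :=
  ⟨PySem.Int.mod_nonneg _ hL, PySem.Int.mod_lt _ hL⟩

lemma pv_gpow_bounds (xs : List Int) (hL : 0 < (xs.length : Int)) :
    ∀ (p : Nat), 1 ≤ p → ∀ i, 0 ≤ pv_gpow xs p i ∧ pv_gpow xs p i < (xs.length : Int) := by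
  intro p
  induction p with
  | zero => omega
  | succ p ih =>
    intro _ i
    show 0 ≤ pv_gpow xs p (pv_g xs i) ∧ _
    cases p with
    | zero => exact pv_g_bounds xs hL i
    | succ q => exact ih (by omega) _

lemma pv_gpow_add (xs : List Int) :
    ∀ (a b : Nat) (i : Int), pv_gpow xs (a + b) i = pv_gpow xs b (pv_gpow xs a i) := by
  intro a
  induction a with
  | zero => intro b i; rw [Nat.zero_add]; rfl
  | succ a ih =>
    intro b i
    rw [Nat.succ_add]
    show pv_gpow xs (a + b) (pv_g xs i) = _
    rw [ih]
    rfl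

lemma pv_wsum_add (xs : List Int) :
    ∀ (a b : Nat) (i : Int),
      pv_wsum xs (a + b) i = pv_wsum xs a i + pv_wsum xs b (pv_gpow xs a i) := by
  intro a
  induction a with
  | zero =>
    intro b i
    rw [Nat.zero_add]
    show pv_wsum xs b i = 0 + pv_wsum xs b (pv_gpow xs 0 i)
    rw [Int.zero_add]
    rfl
  | succ a ih =>
    intro b i
    rw [Nat.succ_add]
    show pv_pget xs i + pv_wsum xs (a + b) (pv_g xs i) = _
    rw [ih]
    show _ = (pv_pget xs i + pv_wsum xs a (pv_g xs i)) + pv_wsum xs b (pv_gpow xs (a + 1) i)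
    have : pv_gpow xs (a + 1) i = pv_gpow xs a (pv_g xs i) := rfl
    rw [this]
    ring

-- A's inner loop computes the walk sum (up to normalisation of the running index)
lemma pv_innerA (xs : List Int) (good : pv_Good xs) :
    ∀ (k : Nat) (s i : Int), -(xs.length : Int) ≤ i → i < (xs.length : Int) →
      ((stepA xs)^[k] (s, i)).1 = s + pv_wsum xs k (PySem.Int.mod i (xs.length : Int)) := by
  intro k
  induction k with
  | zero => intro s i _ _; show s = s + pv_wsum xs 0 _; simp [pv_wsum]
  | succ k ih =>
    intro s i h0 h1
    have hL : (0 : Int) < xs.length := by omega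
    have hv : pv_pget xs i ∈ xs := PySem.List.pyGetD_mem xs 0 ⟨h0, h1⟩
    obtain ⟨hb1, hb2⟩ := good _ hv
    rw [Function.iterate_succ_apply]
    have hstep : stepA xs (s, i) = (s + pv_pget xs i, pv_pget xs i - 1) := rfl
    rw [hstep, ih (s + pv_pget xs i) (pv_pget xs i - 1) (by omega) (by omega)]
    have hmod0 : 0 ≤ PySem.Int.mod i (xs.length : Int) := PySem.Int.mod_nonneg _ hL
    have hmod1 : PySem.Int.mod i (xs.length : Int) < (xs.length : Int) := PySem.Int.mod_lt _ hL
    have hpg : pv_pget xs (PySem.Int.mod i (xs.length : Int)) = pv_pget xs i :=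
      pv_pget_wrap xs h0 h1
    show _ = s + (pv_pget xs (PySem.Int.mod i (xs.length : Int)) +
      pv_wsum xs k (pv_g xs (PySem.Int.mod i (xs.length : Int))))
    have hg : pv_g xs (PySem.Int.mod i (xs.length : Int))
        = PySem.Int.mod (pv_pget xs i - 1) (xs.length : Int) := by
      unfold pv_g; rw [hpg]
    rw [hpg, hg]
    ring

-- the initial tables are 1-step tables
lemma pv_tbl_base (xs : List Int) :
    pv_TblOK xs 1 (xs.map fun v => PySem.Int.mod (v - 1) (xs.length : Int)) xs := by
  refine ⟨by simp, rfl, ?_⟩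
  intro i h0 h1
  have hi : i.toNat < xs.length := by omega
  constructor
  · rw [PySem.List.pyGetD_eq_getElem _ _ h0 (by simpa using h1)]
    rw [List.getElem_map]
    show _ = pv_g xs i
    unfold pv_g pv_pget
    rw [PySem.List.pyGetD_eq_getElem _ _ h0 h1]
  · rw [PySem.List.pyGetD_eq_getElem _ _ h0 h1]
    show _ = pv_pget xs i + pv_wsum xs 0 _
    unfold pv_pget
    rw [PySem.List.pyGetD_eq_getElem _ _ h0 h1]
    simp [pv_wsum]

-- doubling the tables doubles the power
lemma pv_tbl_double (xs : List Int) (hL : 0 < (xs.length : Int)) {p : Nat} (hp : 1 ≤ p)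
    {nxt wt : List Int} (hT : pv_TblOK xs p nxt wt) :
    pv_TblOK xs (p + p)
      ((List.range xs.length).map fun i =>
        PySem.List.pyGetD nxt (PySem.List.pyGetD nxt (Int.ofNat i) 0) 0)
      ((List.range xs.length).map fun i =>
        PySem.List.pyGetD wt (Int.ofNat i) 0 +
        PySem.List.pyGetD wt (PySem.List.pyGetD nxt (Int.ofNat i) 0) 0) := by
  obtain ⟨hln, hlw, hTa⟩ := hT
  refine ⟨by simp, by simp, ?_⟩
  intro i h0 h1
  have hi : i.toNat < xs.length := by omega
  have hcast : (Int.ofNat i.toNat) = i := by rw [Int.ofNat_eq_natCast]; omega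
  have hgp := pv_gpow_bounds xs hL p hp i
  have h₁ := hTa i h0 h1
  have h₂ := hTa (pv_gpow xs p i) hgp.1 hgp.2
  constructor
  · rw [PySem.List.pyGetD_eq_getElem _ _ h0 (by simpa using h1)]
    rw [List.getElem_map, List.getElem_range, hcast, h₁.1, h₂.1, pv_gpow_add]
  · rw [PySem.List.pyGetD_eq_getElem _ _ h0 (by simpa using h1)]
    rw [List.getElem_map, List.getElem_range, hcast, h₁.2, h₁.1, h₂.2, pv_wsum_add]

-- the query fold over the built levels assembles the m·p-step walk
lemma pv_query (xs : List Int) (hL : 0 < (xs.length : Int)) :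
    ∀ (m : Nat), ∀ (p : Nat) (nxt wt : List Int), 1 ≤ p → pv_TblOK xs p nxt wt →
      ∀ (s c : Int), 0 ≤ c → c < (xs.length : Int) →
        (buildLevels xs.length nxt wt m).foldl queryLevel (s, c)
          = (s + pv_wsum xs (m * p) c, pv_gpow xs (m * p) c) := by
  intro m
  induction m using Nat.strong_induction_on with
  | _ m ih =>
    intro p nxt wt hp hT s c hc0 hc1
    by_cases h0 : m = 0
    · subst h0
      rw [buildLevels]
      simp [pv_wsum, pv_gpow]
    · obtain ⟨hln, hlw, hTa⟩ := hT
      obtain ⟨hnx, hwt⟩ := hTa c hc0 hc1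
      rw [buildLevels, if_neg h0]
      by_cases hb : m % 2 = 1
      · have hq : queryLevel (s, c) (decide (m % 2 = 1), nxt, wt)
            = (s + pv_wsum xs p c, pv_gpow xs p c) := by
          simp [queryLevel, hb, hnx, hwt]
        by_cases h2 : m / 2 = 0
        · have hm1 : m = 1 := by omega
          rw [if_pos h2, List.foldl_cons, hq, List.foldl_nil, hm1, Nat.one_mul]
        · have hgb := pv_gpow_bounds xs hL p hp c
          rw [if_neg h2, List.foldl_cons, hq,
            ih (m / 2) (by omega) (p + p) _ _ (by omega)
              (pv_tbl_double xs hL hp ⟨hln, hlw, fun i a b => hTa i a b⟩)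
              (s + pv_wsum xs p c) (pv_gpow xs p c) hgb.1 hgb.2]
          obtain ⟨q, hmq⟩ : ∃ q, m = 2 * q + 1 := ⟨m / 2, by omega⟩
          have hq2 : m / 2 = q := by omega
          have he : m * p = p + m / 2 * (p + p) := by rw [hq2, hmq]; ring
          rw [he, pv_wsum_add, pv_gpow_add, Prod.mk.injEq]
          exact ⟨by ring, rfl⟩
      · have hq : queryLevel (s, c) (decide (m % 2 = 1), nxt, wt) = (s, c) := by
          simp [queryLevel, hb]
        have h2 : ¬ (m / 2 = 0) := by omega
        rw [if_neg h2, List.foldl_cons, hq,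
          ih (m / 2) (by omega) (p + p) _ _ (by omega)
            (pv_tbl_double xs hL hp ⟨hln, hlw, fun i a b => hTa i a b⟩) s c hc0 hc1]
        have he : m * p = m / 2 * (p + p) := by
          obtain ⟨q, hmq⟩ : ∃ q, m = 2 * q := ⟨m / 2, by omega⟩
          have hq2 : m / 2 = q := by omega
          rw [hq2, hmq]; ring
        rw [he]

lemma pv_foldl_max_zero : ∀ (l : List Int), l.foldl (fun b (_ : Int) => max b 0) (0 : Int) = 0 := by
  intro l
  induction l with
  | nil => rfl
  | cons x l ih => rw [List.foldl_cons, max_self]; exact ih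

-- ===== VERDICT (by name: the statement is the Claim_ definition above) =====
theorem solution_spec : Claim_equal_solution := by
  intro N M numbers _ hPre
  unfold Spec_solution solution solution_alt
  by_cases hN : 0 < N
  · obtain ⟨hNL, hrest⟩ := hPre hN
    have hL : 0 < (numbers.length : Int) := by omega
    by_cases hM : 0 < M
    · have good : pv_Good numbers := fun v hv => hrest hM v hv
      rw [if_neg (fun h => by rcases h with h | h | h <;> omega)]
      simp only []
      apply PySem.List.foldl_congr_mem
      intro acc n hn
      obtain ⟨hn0, hn1⟩ := PySem.List.mem_pyRange_one.1 hn
      have hnL : n < (numbers.length : Int) := by omega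
      -- A's inner loop
      rw [List.foldl_const, PySem.List.length_pyRange_one]
      rw [pv_innerA numbers good _ 0 n (by omega) hnL, pv_mod_id hn0 hnL]
      -- B's query
      rw [pv_query numbers hL M.toNat 1 _ _ (by omega) (pv_tbl_base numbers) 0 n hn0 hnL]
      simp
    · rw [if_pos (Or.inr (Or.inl (by omega)))]
      have hMr : PySem.List.pyRange 0 M 1 = [] := PySem.List.pyRange_one_eq_nil (by omega)
      simp only [hMr, List.foldl_nil]
      exact pv_foldl_max_zero _
  · rw [if_pos (Or.inl (by omega))]
    have hNr : PySem.List.pyRange 0 N 1 = [] := PySem.List.pyRange_one_eq_nil (by omega)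
    rw [hNr]
    rfl
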